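-- pv_equiv track=rewrite | github.com/sumeetsarkar/dsalgo | easy/UniqueEmailAddress.py | resolve_component
-- ===== SOURCE A (Python) =====
-- def resolve_component(str):
--     resolved_str = ''
--     for c in str:
--         if c == '.':
--             continue
--         if c == '+':
--             break
--         resolved_str += c
--     return resolved_str
-- ===== SOURCE B (Python) =====
-- def resolve_component(str):
--     # truncate at the first '+' (chars after it are never kept), then delete dots
--     return str.split('+', 1)[0].replace('.', '')
-- ===== Notes on version B (the rewrite author's own statement) =====
-- stated objective: idiomatic
-- what changed: Replaces the manual character loop with break/continue by two whole-string library operations: split('+', 1)[0] to truncate at the first '+', then replace('.', '') to delete dots.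
import Mathlib
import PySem

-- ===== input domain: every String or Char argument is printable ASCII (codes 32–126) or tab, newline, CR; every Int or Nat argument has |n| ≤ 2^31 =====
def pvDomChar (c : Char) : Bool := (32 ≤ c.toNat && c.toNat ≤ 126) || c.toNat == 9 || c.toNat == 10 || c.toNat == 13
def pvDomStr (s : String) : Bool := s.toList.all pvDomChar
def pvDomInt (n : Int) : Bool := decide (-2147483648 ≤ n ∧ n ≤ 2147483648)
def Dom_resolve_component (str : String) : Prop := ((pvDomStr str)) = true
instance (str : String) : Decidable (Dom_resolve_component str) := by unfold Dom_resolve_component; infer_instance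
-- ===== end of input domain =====

-- B replaces A's manual per-character loop (continue on '.', break on '+') by two library
-- passes: truncate at the first '+' with split('+', 1)[0], then delete dots with replace('.', '').

-- ===== PORT A =====
-- the loop: skip '.', stop at '+', otherwise append to the accumulator
def resolveGoA (l : List Char) (acc : String) : String :=
  match l with
  | [] => acc
  | c :: rest =>
    if c = '.' then resolveGoA rest acc
    else if c = '+' then acc
    else resolveGoA rest (acc.push c)

def resolve_component (str : String) : String :=
  resolveGoA str.toList ""

-- ===== PORT B =====
-- str.split('+', 1)[0].replace('.', ''); split('+', 1) always returns a nonempty list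
-- (and '+' is a nonempty separator, so splitMax? is some), hence the fallback is unreachable.
def resolve_component_alt (str : String) : String :=
  match PySem.Str.splitMax? str "+" 1 with
  | some (p :: _) => PySem.Str.replace p "." ""
  | _ => ""

-- ===== PRECONDITION & SPEC =====
def Spec_resolve_component (str : String) (out : String) : Prop := out = resolve_component_alt str
instance (str : String) (out : String) : Decidable (Spec_resolve_component str out) := by unfold Spec_resolve_component; infer_instance

-- ===== CLAIM (what is proved, stated in full; the proofs are below) =====
def Claim_equal_resolve_component : Prop := ∀ (str : String), Dom_resolve_component str → Spec_resolve_component str (resolve_component str)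

-- ===== LEMMAS AND PROOFS =====

-- A's loop builds acc ++ (dots removed from the prefix before the first '+')
theorem resolveGoA_eq (l : List Char) (acc : String) :
    resolveGoA l acc = acc ++ String.ofList ((l.takeWhile (· ≠ '+')).filter (· ≠ '.')) := by
  induction l generalizing acc with
  | nil => simp [resolveGoA]
  | cons c t ih =>
    by_cases hd : c = '.'
    · subst hd
      rw [show resolveGoA ('.' :: t) acc = resolveGoA t acc from by simp [resolveGoA]]
      rw [ih]
      simp
    · by_cases hp : c = '+'
      · subst hp
        rw [show resolveGoA ('+' :: t) acc = acc from by simp [resolveGoA, hd]]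
        simp
      · rw [show resolveGoA (c :: t) acc = resolveGoA t (acc.push c) from by
          simp [resolveGoA, hd, hp]]
        rw [ih]
        rw [List.takeWhile_cons_of_pos (by simp [hp]), List.filter_cons_of_pos (by simp [hd])]
        apply String.toList_inj.mp
        simp

-- with m = 0 the split loop returns immediately: [x, l]
theorem splitGo_zero (fuel : ℕ) (l : List Char) (x : List Char) :
    PySem.Chars.splitOnMax.go ['+'] fuel 0 l [] [x] = [x, l] := by
  match fuel, l with
  | 0, l => simp [PySem.Chars.splitOnMax.go]
  | Nat.succ f, [] => simp [PySem.Chars.splitOnMax.go]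
  | Nat.succ f, c :: rest => simp [PySem.Chars.splitOnMax.go]

-- first piece of the maxsplit-1 scan is the prefix before the first '+'
theorem splitGo_one (fuel : ℕ) (l cur : List Char) (h : l.length ≤ fuel) :
    ∃ r, PySem.Chars.splitOnMax.go ['+'] fuel 1 l cur [] =
      (cur.reverse ++ l.takeWhile (· ≠ '+')) :: r := by
  induction fuel generalizing l cur with
  | zero =>
    have : l = [] := by cases l <;> simp_all
    subst this
    exact ⟨[], by simp [PySem.Chars.splitOnMax.go]⟩
  | succ f ih =>
    cases l with
    | nil => exact ⟨[], by simp [PySem.Chars.splitOnMax.go]⟩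
    | cons c t =>
      by_cases hc : c = '+'
      · subst hc
        refine ⟨[t], ?_⟩
        rw [show PySem.Chars.splitOnMax.go ['+'] (f+1) 1 ('+' :: t) cur []
            = PySem.Chars.splitOnMax.go ['+'] f 0 t [] [cur.reverse] from by
          simp [PySem.Chars.splitOnMax.go, List.isPrefixOf]]
        rw [splitGo_zero]
        simp
      · obtain ⟨r, hr⟩ := ih t (c :: cur) (by simpa using Nat.le_of_succ_le_succ (by simpa using h))
        refine ⟨r, ?_⟩
        rw [show PySem.Chars.splitOnMax.go ['+'] (f+1) 1 (c :: t) cur []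
            = PySem.Chars.splitOnMax.go ['+'] f 1 t (c :: cur) [] from by
          simp [PySem.Chars.splitOnMax.go, List.isPrefixOf, Ne.symm hc]]
        rw [hr]
        simp [hc]

-- replacing '.' by the empty string is filtering out the dots
theorem replaceGo_dot (fuel : ℕ) (l acc : List Char) (h : l.length ≤ fuel) :
    PySem.Chars.replace.go ['.'] [] fuel l acc = acc.reverse ++ l.filter (· ≠ '.') := by
  induction fuel generalizing l acc with
  | zero =>
    have : l = [] := by cases l <;> simp_all
    subst this; simp [PySem.Chars.replace.go]
  | succ f ih =>
    cases l with
    | nil => simp [PySem.Chars.replace.go]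
    | cons c t =>
      by_cases hc : c = '.'
      · subst hc
        rw [show PySem.Chars.replace.go ['.'] [] (f+1) ('.' :: t) acc
            = PySem.Chars.replace.go ['.'] [] f t acc from by
          simp [PySem.Chars.replace.go, List.isPrefixOf]]
        rw [ih t acc (by simpa using Nat.le_of_succ_le_succ (by simpa using h))]
        simp
      · rw [show PySem.Chars.replace.go ['.'] [] (f+1) (c :: t) acc
            = PySem.Chars.replace.go ['.'] [] f t (c :: acc) from by
          simp [PySem.Chars.replace.go, List.isPrefixOf, Ne.symm hc]]
        rw [ih t (c :: acc) (by simpa using Nat.le_of_succ_le_succ (by simpa using h))]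
        simp [hc]

theorem replace_dot (l : List Char) :
    PySem.Chars.replace l ['.'] [] = l.filter (· ≠ '.') := by
  rw [show PySem.Chars.replace l ['.'] [] = PySem.Chars.replace.go ['.'] [] l.length l [] from by
    simp [PySem.Chars.replace]]
  simpa using replaceGo_dot l.length l [] le_rfl

theorem alt_eq (str : String) :
    resolve_component_alt str
      = String.ofList ((str.toList.takeWhile (· ≠ '+')).filter (· ≠ '.')) := by
  obtain ⟨r, hr⟩ := splitGo_one (str.toList.length + 1) str.toList []
    (Nat.le_succ _)
  unfold resolve_component_alt
  rw [show PySem.Str.splitMax? str "+" 1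
      = some (List.map String.ofList (PySem.Chars.splitOnMax.go ['+'] (str.toList.length + 1) 1 str.toList [] [])) from by
    simp [PySem.Str.splitMax?, PySem.Chars.splitMax?, PySem.Chars.splitOnMax]]
  rw [hr]
  simp only [List.map_cons]
  apply String.toList_inj.mp
  rw [PySem.Str.toList_replace]
  simp [replace_dot]

-- ===== VERDICT (by name: the statement is the Claim_ definition above) =====
theorem resolve_component_spec : Claim_equal_resolve_component := by
  intro str _
  unfold Spec_resolve_component resolve_component
  rw [resolveGoA_eq, alt_eq]
  apply String.toList_inj.mp
  simp
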